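-- pv_equiv track=rewrite | github.com/CudaText-addons/cuda_complete_from_text | __init__.py | spl_match
-- ===== SOURCE A (Python) =====
-- def spl_match(begin, words):
--     '''returns True if 'begin' fits consecutively into 'words' (prefixes of 'words')'''
--
--     word = words[0]
--     common_len = 0
--     for i in range(min(len(begin), len(word))):
--         if begin[i] == word[i]:
--             common_len = i+1
--         else:
--             break
--
--     if common_len > 0:
--         if len(begin) == common_len: # last match success
--             return True
--         elif len(words) == 1: # last word - should be full prefix
--             return False
--
--         for i in range(common_len): # i: 0 and 1 for common_len=2 ->
--             # ... on calling spl_match() 'begin' will always be non-empty - less than full match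
--             res = spl_match(begin[common_len-i:], words[1:])
--             if res:
--                 return True
--
--     return False
-- ===== SOURCE B (Python) =====
-- def spl_match(begin, words):
--     '''returns True if 'begin' fits consecutively into 'words' (prefixes of 'words')'''
--     n = len(begin)
--     cur = {0}
--     for word in words:
--         nxt = set()
--         for j in cur:
--             l = 0
--             while l < n - j and l < len(word) and begin[j + l] == word[l]:
--                 l += 1
--             if l > 0:
--                 if l == n - j:
--                     return True
--                 nxt.update(range(j + 1, j + l + 1))
--         if not nxt:
--             break
--         cur = nxt
--     return False
-- ===== Notes on version B (the rewrite author's own statement) =====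
-- stated objective: faster
-- what changed: Replaced the exponential branching recursion over string suffixes by a forward BFS over the set of reachable split offsets, one level per word, which makes the worst case polynomial (O(len(words)*len(begin)^2)).
import Mathlib
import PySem

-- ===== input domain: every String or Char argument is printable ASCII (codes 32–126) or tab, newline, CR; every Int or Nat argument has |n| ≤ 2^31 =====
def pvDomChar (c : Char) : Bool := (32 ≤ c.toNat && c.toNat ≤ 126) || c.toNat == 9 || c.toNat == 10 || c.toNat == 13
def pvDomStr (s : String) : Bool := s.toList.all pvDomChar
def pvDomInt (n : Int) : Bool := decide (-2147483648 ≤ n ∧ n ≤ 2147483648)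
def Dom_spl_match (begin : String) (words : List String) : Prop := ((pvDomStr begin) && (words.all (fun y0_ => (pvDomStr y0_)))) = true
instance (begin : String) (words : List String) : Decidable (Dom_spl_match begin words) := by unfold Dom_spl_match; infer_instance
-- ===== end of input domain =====

-- B replaces A's exponential branching recursion over string suffixes by a forward BFS over the
-- set of reachable split offsets (one level per word), which is polynomial in the input size.

-- ===== PORT A =====
-- A's prefix loop: 'for i in range(min(len(begin),len(word))): if begin[i]==word[i]: common_len=i+1 else: break'
-- (state: i = loop counter, cl = common_len; b[i]? = PySem pyGet? at a nonnegative in-range index)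
def aCommonLoop (b w : List Char) (i cl : Nat) : Nat :=
  if i < min b.length w.length then
    if b[i]? = w[i]? then aCommonLoop b w (i + 1) (i + 1) else cl
  else cl
termination_by min b.length w.length - i

-- A's body; 'begin[common_len-i:]' = List.drop (cl - i) (PySem.List.slice_from_natCast: xs[a:] with a : Nat is drop a);
-- '.any' over 'List.range cl' is the 'for i in range(common_len)' loop with its early 'return True'.
def splA (b : List Char) (words : List (List Char)) : Bool :=
  match words with
  | [] => false  -- Python raises IndexError at 'words[0]'; excluded by Pre_spl_match
  | w :: ws =>
    let cl := aCommonLoop b w 0 0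
    if 0 < cl then
      if b.length = cl then true
      else if ws = [] then false       -- 'len(words) == 1'
      else (List.range cl).any fun i => splA (b.drop (cl - i)) ws
    else false
termination_by words.length

def spl_match (begin : String) (words : List String) : Bool :=
  splA begin.toList (words.map String.toList)

-- ===== PORT B =====
-- Source B's inner while loop: 'while l < n - j and l < len(word) and begin[j+l] == word[l]: l += 1'
def bLcpLoop (b w : List Char) (j l : Nat) : Nat :=
  if l < b.length - j ∧ l < w.length ∧ b[j + l]? = w[l]? then bLcpLoop b w j (l + 1) else l
termination_by b.length - j - l
decreasing_by omega

-- Source B's 'for j in cur' loop: state (returned-True flag, nxt); 'nxt.update(range(j+1, j+l+1))' =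
-- PySem.Set.update with List.range' (j+1) l (the offsets here are the nonnegative ints j+1 .. j+l).
def bStep (b w : List Char) (st : Bool × PySem.Set Nat) (j : Nat) : Bool × PySem.Set Nat :=
  if st.1 then st
  else
    let l := bLcpLoop b w j 0
    if 0 < l then
      if l = b.length - j then (true, st.2)
      else (st.1, PySem.Set.update st.2 (List.range' (j + 1) l))
    else st

def bScan (b w : List Char) (cur : List Nat) : Bool × PySem.Set Nat :=
  cur.foldl (bStep b w) (false, PySem.Set.empty)

-- Source B's 'for word in words' loop with the early 'return True' and the 'if not nxt: break'
def splB (b : List Char) (words : List (List Char)) (cur : PySem.Set Nat) : Bool :=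
  match words with
  | [] => false
  | w :: ws =>
    let st := bScan b w cur
    if st.1 then true
    else if st.2 = [] then false
    else splB b ws st.2
termination_by words.length

def spl_match_alt (begin : String) (words : List String) : Bool :=
  splB begin.toList (words.map String.toList) (PySem.Set.ofList [0])

-- ===== PRECONDITION & SPEC =====
-- Pre_ excludes only words = [], where Python A raises IndexError at 'words[0]'.
def Pre_spl_match (begin : String) (words : List String) : Prop := words ≠ []
instance (begin : String) (words : List String) : Decidable (Pre_spl_match begin words) := by
  unfold Pre_spl_match; infer_instance

def pvWitness_spl_match : String × List String := ("ab", ["a", "b"])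

def Spec_spl_match (begin : String) (words : List String) (out : Bool) : Prop := out = spl_match_alt begin words
instance (begin : String) (words : List String) (out : Bool) : Decidable (Spec_spl_match begin words out) := by unfold Spec_spl_match; infer_instance

-- ===== CLAIM (what is proved, stated in full; the proofs are below) =====
def Claim_equal_spl_match : Prop := ∀ (begin : String) (words : List String), Dom_spl_match begin words → Pre_spl_match begin words → Spec_spl_match begin words (spl_match begin words)

-- ===== LEMMAS AND PROOFS =====

-- the longest common prefix length, the value both loops compute
def lcp : List Char → List Char → Nat
  | x :: xs, y :: ys => if x = y then lcp xs ys + 1 else 0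
  | _, _ => 0

theorem lcp_nil_left (w : List Char) : lcp [] w = 0 := by cases w <;> rfl

theorem lcp_step (b w : List Char) (hb : 0 < b.length) (hw : 0 < w.length)
    (h : b[0]? = w[0]?) : lcp b w = lcp b.tail w.tail + 1 := by
  cases b with
  | nil => simp at hb
  | cons x xs =>
    cases w with
    | nil => simp at hw
    | cons y ys => simp_all [lcp]

theorem lcp_zero_of_ne (b w : List Char) (h : b[0]? ≠ w[0]?) : lcp b w = 0 := by
  cases b with
  | nil => exact lcp_nil_left w
  | cons x xs =>
    cases w with
    | nil => rfl
    | cons y ys => simp_all [lcp]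

theorem lcp_nil_right (b : List Char) : lcp b [] = 0 := by cases b <;> rfl

theorem aCommonLoop_eq (b w : List Char) :
    ∀ i, aCommonLoop b w i i = i + lcp (b.drop i) (w.drop i) := by
  suffices H : ∀ k i, min b.length w.length - i ≤ k →
      aCommonLoop b w i i = i + lcp (b.drop i) (w.drop i) from fun i => H _ i le_rfl
  intro k
  induction k with
  | zero =>
    intro i hk
    rw [aCommonLoop]
    have hge : ¬ i < min b.length w.length := by omega
    rw [if_neg hge]
    rcases Nat.not_lt.mp hge |> (by omega : min b.length w.length ≤ i → b.length ≤ i ∨ w.length ≤ i) with h | h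
    · rw [List.drop_eq_nil_of_le h, lcp_nil_left]; omega
    · rw [List.drop_eq_nil_of_le h, lcp_nil_right]; omega
  | succ k ih =>
    intro i hk
    rw [aCommonLoop]
    by_cases hlt : i < min b.length w.length
    · rw [if_pos hlt]
      have hib : i < b.length := by omega
      have hiw : i < w.length := by omega
      by_cases heq : b[i]? = w[i]?
      · rw [if_pos heq, ih (i + 1) (by omega)]
        have hstep : lcp (b.drop i) (w.drop i) = lcp (b.drop (i + 1)) (w.drop (i + 1)) + 1 := by
          rw [List.drop_add_one_eq_tail_drop, List.drop_add_one_eq_tail_drop]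
          apply lcp_step
          · simpa using hib
          · simpa using hiw
          · simpa using heq
        omega
      · rw [if_neg heq]
        have : lcp (b.drop i) (w.drop i) = 0 := by
          apply lcp_zero_of_ne
          simpa using heq
        omega
    · rw [if_neg hlt]
      rcases (by omega : b.length ≤ i ∨ w.length ≤ i) with h | h
      · rw [List.drop_eq_nil_of_le h, lcp_nil_left]; omega
      · rw [List.drop_eq_nil_of_le h, lcp_nil_right]; omega

theorem bLcpLoop_eq_aux (b w : List Char) (j : Nat) :
    ∀ k l, b.length - j - l ≤ k → bLcpLoop b w j l = l + lcp (b.drop (j + l)) (w.drop l) := by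
  intro k
  induction k with
  | zero =>
    intro l hk
    rw [bLcpLoop]
    have hc : ¬ (l < b.length - j ∧ l < w.length ∧ b[j + l]? = w[l]?) := by
      rintro ⟨h1, -, -⟩; omega
    rw [if_neg hc]
    rw [List.drop_eq_nil_of_le (by omega : b.length ≤ j + l), lcp_nil_left]
    omega
  | succ k ih =>
    intro l hk
    rw [bLcpLoop]
    by_cases hc : l < b.length - j ∧ l < w.length ∧ b[j + l]? = w[l]?
    · rw [if_pos hc]
      obtain ⟨h1, h2, h3⟩ := hc
      rw [ih (l + 1) (by omega)]
      have hstep : lcp (b.drop (j + l)) (w.drop l) = lcp (b.drop (j + l + 1)) (w.drop (l + 1)) + 1 := by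
        rw [List.drop_add_one_eq_tail_drop, List.drop_add_one_eq_tail_drop]
        apply lcp_step
        · simp; omega
        · simpa using h2
        · simpa using h3
      rw [Nat.add_assoc] at hstep
      omega
    · rw [if_neg hc]
      rcases (by tauto : ¬ l < b.length - j ∨ ¬ l < w.length ∨ ¬ b[j + l]? = w[l]?) with h | h | h
      · by_cases hb : b.length ≤ j + l
        · rw [List.drop_eq_nil_of_le hb, lcp_nil_left]; omega
        · omega
      · rw [show w.drop l = [] from List.drop_eq_nil_of_le (by omega), lcp_nil_right]; omega
      · have h0 : lcp (b.drop (j + l)) (w.drop l) = 0 := lcp_zero_of_ne _ _ (by simpa using h)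
        omega

theorem bLcpLoop_eq (b w : List Char) (j : Nat) :
    bLcpLoop b w j 0 = lcp (b.drop j) w := by
  simpa using bLcpLoop_eq_aux b w j _ 0 le_rfl

-- A's value on a nonempty word list, phrased through lcp
theorem splA_cons_iff (b w : List Char) (ws : List (List Char)) :
    splA b (w :: ws) = true ↔
      0 < lcp b w ∧ (b.length = lcp b w ∨
        (ws ≠ [] ∧ ∃ k, 1 ≤ k ∧ k ≤ lcp b w ∧ splA (b.drop k) ws = true)) := by
  have h0 : aCommonLoop b w 0 0 = lcp b w := by simpa using aCommonLoop_eq b w 0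
  rw [splA]
  simp only [h0]
  by_cases hp : 0 < lcp b w
  · rw [if_pos hp]
    by_cases hfull : b.length = lcp b w
    · rw [if_pos hfull]; simp [hp, hfull]
    · rw [if_neg hfull]
      by_cases hw : ws = []
      · rw [if_pos hw]; simp [hw, hfull]
      · rw [if_neg hw]
        rw [List.any_eq_true]
        constructor
        · rintro ⟨i, hi, h⟩
          rw [List.mem_range] at hi
          exact ⟨hp, Or.inr ⟨hw, lcp b w - i, by omega, by omega, h⟩⟩
        · rintro ⟨-, h | ⟨-, k, hk1, hk2, h⟩⟩
          · exact absurd h hfull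
          · refine ⟨lcp b w - k, by rw [List.mem_range]; omega, ?_⟩
            rw [show lcp b w - (lcp b w - k) = k from by omega]
            exact h
  · rw [if_neg hp]
    simp [hp]

-- the fold of Source B's inner loop keeps its early-return flag once set
theorem foldl_bStep_true (b w : List Char) (cur : List Nat) (S : PySem.Set Nat) :
    cur.foldl (bStep b w) (true, S) = (true, S) := by
  induction cur with
  | nil => rfl
  | cons j rest ih => rw [List.foldl_cons]; simpa [bStep] using ih

-- a non-full offset leaves the flag false and adds exactly the offsets j+1 .. j+lcp
theorem bStep_false_eq (b w : List Char) (S : PySem.Set Nat) (j : Nat)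
    (h : ¬(0 < lcp (b.drop j) w ∧ lcp (b.drop j) w = b.length - j)) :
    bStep b w (false, S) j = (false, PySem.Set.update S (List.range' (j + 1) (lcp (b.drop j) w))) := by
  simp only [bStep, bLcpLoop_eq]
  by_cases h1 : 0 < lcp (b.drop j) w
  · rw [if_neg (by simp), if_pos h1, if_neg (fun he => h ⟨h1, he⟩)]
  · rw [if_neg (by simp), if_neg h1]
    rw [show lcp (b.drop j) w = 0 from by omega]
    rfl

-- the flag after the inner loop: set iff some offset in cur fully matches the rest of begin
theorem bScan_found_iff (b w : List Char) (cur : List Nat) :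
    ∀ S, (cur.foldl (bStep b w) (false, S)).1 = true ↔
      ∃ j ∈ cur, 0 < lcp (b.drop j) w ∧ lcp (b.drop j) w = b.length - j := by
  induction cur with
  | nil => intro S; simp
  | cons j rest ih =>
    intro S
    rw [List.foldl_cons]
    by_cases hfull : 0 < lcp (b.drop j) w ∧ lcp (b.drop j) w = b.length - j
    · have hb : bStep b w (false, S) j = (true, S) := by
        simp only [bStep, bLcpLoop_eq]
        rw [if_neg (by simp), if_pos hfull.1, if_pos hfull.2]
      rw [hb, foldl_bStep_true]
      exact iff_of_true rfl ⟨j, by simp, hfull⟩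
    · rw [bStep_false_eq b w S j hfull, ih]
      constructor
      · rintro ⟨j', hj', hx⟩; exact ⟨j', by simp [hj'], hx⟩
      · rintro ⟨j', hj', hx⟩
        rcases List.mem_cons.mp hj' with rfl | hj'
        · exact absurd hx hfull
        · exact ⟨j', hj', hx⟩

-- membership in the accumulated nxt set, when no offset in cur fully matches
theorem mem_foldl_bStep (b w : List Char) (cur : List Nat) :
    ∀ S k, (∀ j ∈ cur, ¬(0 < lcp (b.drop j) w ∧ lcp (b.drop j) w = b.length - j)) →
      (k ∈ (cur.foldl (bStep b w) (false, S)).2 ↔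
        k ∈ S ∨ ∃ j ∈ cur, j < k ∧ k ≤ j + lcp (b.drop j) w) := by
  induction cur with
  | nil => intro S k _; simp
  | cons j rest ih =>
    intro S k h
    rw [List.foldl_cons, bStep_false_eq b w S j (h j (by simp)),
      ih _ k (fun j' hj' => h j' (by simp [hj'])), PySem.Set.mem_update, List.mem_range'_1]
    constructor
    · rintro ((hS | ⟨hr1, hr2⟩) | ⟨j', hj', h1, h2⟩)
      · exact Or.inl hS
      · exact Or.inr ⟨j, by simp, by omega, by omega⟩
      · exact Or.inr ⟨j', by simp [hj'], h1, h2⟩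
    · rintro (hS | ⟨j', hj', h1, h2⟩)
      · exact Or.inl (Or.inl hS)
      · rcases List.mem_cons.mp hj' with rfl | hj'
        · exact Or.inl (Or.inr ⟨by omega, by omega⟩)
        · exact Or.inr ⟨j', hj', h1, h2⟩

-- B's BFS invariant: the loop from offset set 'cur' succeeds iff A succeeds from some offset in 'cur'
theorem splB_iff (b : List Char) (words : List (List Char)) :
    ∀ cur, splB b words cur = true ↔ ∃ j ∈ cur, splA (b.drop j) words = true := by
  induction words with
  | nil => intro cur; rw [splB]; simp [splA]
  | cons w ws ih =>
    intro cur
    rw [splB]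
    cases h1 : (bScan b w cur).1 with
    | true =>
      obtain ⟨j, hj, hl, hfull⟩ := (bScan_found_iff b w cur PySem.Set.empty).mp (by rw [← bScan]; exact h1)
      have hsA : splA (b.drop j) (w :: ws) = true := by
        rw [splA_cons_iff]
        exact ⟨hl, Or.inl (by rw [List.length_drop]; omega)⟩
      constructor
      · intro _; exact ⟨j, hj, hsA⟩
      · intro _; simp
    | false =>
      have hnf : ∀ j ∈ cur, ¬(0 < lcp (b.drop j) w ∧ lcp (b.drop j) w = b.length - j) := by
        intro j hj hx
        have : (bScan b w cur).1 = true := by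
          rw [bScan]; exact (bScan_found_iff b w cur PySem.Set.empty).mpr ⟨j, hj, hx⟩
        simp [h1] at this
      have hmem : ∀ k, k ∈ (bScan b w cur).2 ↔ ∃ j ∈ cur, j < k ∧ k ≤ j + lcp (b.drop j) w := by
        intro k
        rw [bScan, mem_foldl_bStep b w cur PySem.Set.empty k hnf]
        simp [PySem.Set.empty]
      have hR : (∃ j ∈ cur, splA (b.drop j) (w :: ws) = true) ↔
          (ws ≠ [] ∧ ∃ k ∈ (bScan b w cur).2, splA (b.drop k) ws = true) := by
        constructor
        · rintro ⟨j, hj, hs⟩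
          rw [splA_cons_iff] at hs
          obtain ⟨hl, hcase⟩ := hs
          rcases hcase with he | ⟨hws, k, hk1, hk2, hs⟩
          · rw [List.length_drop] at he
            exact absurd ⟨hl, he.symm⟩ (hnf j hj)
          · rw [List.drop_drop] at hs
            exact ⟨hws, j + k, (hmem _).mpr ⟨j, hj, by omega, by omega⟩, hs⟩
        · rintro ⟨hws, k, hk, hs⟩
          obtain ⟨j, hj, h1', h2'⟩ := (hmem k).mp hk
          refine ⟨j, hj, ?_⟩
          rw [splA_cons_iff]
          refine ⟨by omega, Or.inr ⟨hws, k - j, by omega, by omega, ?_⟩⟩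
          rw [List.drop_drop, show j + (k - j) = k from by omega]
          exact hs
      by_cases hws : ws = []
      · subst hws
        have hfalse : splB b [] (bScan b w cur).2 = false := by rw [splB]
        rw [if_neg (Bool.false_ne_true)]
        constructor
        · intro hx
          split_ifs at hx
          rw [hfalse] at hx
          cases hx
        · intro hx
          exact absurd rfl (hR.mp hx).1
      · by_cases hN : (bScan b w cur).2 = []
        · rw [if_neg (Bool.false_ne_true), if_pos hN]
          constructor
          · intro hx; cases hx
          · intro hx
            obtain ⟨-, k, hk, -⟩ := hR.mp hx
            rw [hN] at hk; cases hk
        · rw [if_neg (Bool.false_ne_true), if_neg hN, ih, hR]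
          constructor
          · rintro ⟨k, hk, hs⟩; exact ⟨hws, k, hk, hs⟩
          · rintro ⟨-, k, hk, hs⟩; exact ⟨k, hk, hs⟩

-- ===== VERDICT (by name: the statement is the Claim_ definition above) =====
theorem spl_match_spec : Claim_equal_spl_match := by
  intro begin words _ _
  unfold Spec_spl_match spl_match spl_match_alt
  apply Bool.coe_iff_coe.mp
  rw [splB_iff]
  simp [PySem.Set.ofList, PySem.Set.add]
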